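-- pv_equiv track=rewrite | github.com/ntrrgc/dotfiles | .vim/vimlines.py | pos_to_vim
-- ===== SOURCE A (Python) =====
-- def pos_to_vim(document, pos):
--     if pos < 0:
--         raise RuntimeError("Not satisfiable")
--
--     accum = 0
--     for line_no, line_text in enumerate(document, 1):
--         if accum + len(line_text) > pos:
--             if pos - accum == -1:
--                 raise RuntimeError("Not satisfiable") # pos is a \n
--             return line_no, pos - accum
--         accum += len(line_text) + 1 # sum 1 due to \n
--
--     # Exhausted document
--     raise RuntimeError("Not satisfiable")
-- ===== SOURCE B (Python) =====
-- import bisect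
--
-- def pos_to_vim(document, pos):
--     if pos < 0:
--         raise RuntimeError("Not satisfiable")
--     lines = list(document)
--     starts = []
--     acc = 0
--     for line in lines:
--         starts.append(acc)
--         acc += len(line) + 1
--     idx = bisect.bisect_right(starts, pos) - 1
--     if idx < 0:
--         raise RuntimeError("Not satisfiable")
--     col = pos - starts[idx]
--     if col >= len(lines[idx]):
--         raise RuntimeError("Not satisfiable")
--     return idx + 1, col
-- ===== Notes on version B (the rewrite author's own statement) =====
-- stated objective: alternative
-- what changed: Replaces A's single accumulating scan with early return by materializing a prefix-offset table of line starts and locating the containing line with bisect_right (binary search), then validating the column against the line length.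
import Mathlib
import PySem

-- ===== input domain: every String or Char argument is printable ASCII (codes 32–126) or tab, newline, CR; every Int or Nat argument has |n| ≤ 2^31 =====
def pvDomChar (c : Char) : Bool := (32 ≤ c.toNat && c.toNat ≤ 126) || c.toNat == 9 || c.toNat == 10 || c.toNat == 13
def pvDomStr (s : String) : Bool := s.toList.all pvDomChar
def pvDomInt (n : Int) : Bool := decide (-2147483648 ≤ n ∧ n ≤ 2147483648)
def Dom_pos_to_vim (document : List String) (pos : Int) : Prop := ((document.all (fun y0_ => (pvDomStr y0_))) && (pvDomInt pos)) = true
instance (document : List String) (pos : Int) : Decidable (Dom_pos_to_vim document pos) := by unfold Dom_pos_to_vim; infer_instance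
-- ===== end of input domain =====

-- B replaces A's single accumulating scan (with early return) by a prefix table of line
-- start offsets plus a bisect_right search; objective: alternative decomposition.
-- On inputs excluded by Pre_ both Pythons raise RuntimeError; the ports return (0, 0) there.

-- ===== PORT A =====
-- the enumerate loop of A, carrying line_no and accum; the raise points return (0, 0)
def pos_to_vim_go : List String → Int → Int → Int → Int × Int
  | [], _, _, _ => (0, 0)          -- exhausted document: raise
  | line :: rest, pos, lineNo, accum =>
    if accum + PySem.Str.len line > pos then
      if pos - accum = -1 then (0, 0)   -- pos is a \n: raise
      else (lineNo, pos - accum)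
    else pos_to_vim_go rest pos (lineNo + 1) (accum + PySem.Str.len line + 1)

def pos_to_vim (document : List String) (pos : Int) : Int × Int :=
  if pos < 0 then (0, 0)           -- raise
  else pos_to_vim_go document pos 1 0

-- ===== PORT B =====
-- the loop of Source B building the list of line start offsets
def pvStarts : List String → Int → List Int
  | [], _ => []
  | line :: rest, acc => acc :: pvStarts rest (acc + PySem.Str.len line + 1)

-- bisect.bisect_right on the sorted starts list = number of elements ≤ pos
def pvBisectRight (starts : List Int) (pos : Int) : Int :=
  ((starts.takeWhile (fun s => decide (s ≤ pos))).length : Int)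

def pos_to_vim_alt (document : List String) (pos : Int) : Int × Int :=
  if pos < 0 then (0, 0)           -- raise
  else
    let starts := pvStarts document 0
    let idx := pvBisectRight starts pos - 1
    if idx < 0 then (0, 0)         -- raise
    else
      match PySem.List.pyGet? starts idx, PySem.List.pyGet? document idx with
      | some s, some line =>
        let col := pos - s
        if PySem.Str.len line ≤ col then (0, 0)   -- raise
        else (idx + 1, col)
      | _, _ => (0, 0)             -- unreachable: idx is in range

-- ===== PRECONDITION & SPEC =====
-- Pre_ holds exactly when pos is a character position inside some line of the document
-- (not negative, not a newline, not past the end): precisely the inputs where A returns.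
def Pre_pos_to_vim (document : List String) (pos : Int) : Prop :=
  0 ≤ pos ∧ ∃ i ∈ List.range document.length,
    (((document.take i).map (fun l => PySem.Str.len l + 1)).sum ≤ pos ∧
     pos < ((document.take i).map (fun l => PySem.Str.len l + 1)).sum +
           PySem.Str.len (document.getD i ""))
instance (document : List String) (pos : Int) : Decidable (Pre_pos_to_vim document pos) := by
  unfold Pre_pos_to_vim; infer_instance

def pvWitness_pos_to_vim : List String × Int := (["ab", "c"], 3)

def Spec_pos_to_vim (document : List String) (pos : Int) (out : Int × Int) : Prop := out = pos_to_vim_alt document pos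
instance (document : List String) (pos : Int) (out : Int × Int) : Decidable (Spec_pos_to_vim document pos out) := by unfold Spec_pos_to_vim; infer_instance

-- ===== CLAIM (what is proved, stated in full; the proofs are below) =====
def Claim_equal_pos_to_vim : Prop := ∀ (document : List String) (pos : Int), Dom_pos_to_vim document pos → Pre_pos_to_vim document pos → Spec_pos_to_vim document pos (pos_to_vim document pos)

-- ===== LEMMAS AND PROOFS =====

-- reference location: index of the line containing pos and the column within it
def pvRef : List String → Int → Option (Nat × Int)
  | [], _ => none
  | line :: rest, pos =>
    if pos < PySem.Str.len line then
      if pos < 0 then none else some (0, pos)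
    else (pvRef rest (pos - PySem.Str.len line - 1)).map (fun p => (p.1 + 1, p.2))

theorem pvRef_nonneg : ∀ (doc : List String) (pos : Int) (i : Nat) (c : Int),
    pvRef doc pos = some (i, c) → 0 ≤ pos ∧ 0 ≤ c := by
  intro doc
  induction doc with
  | nil => intro pos i c h; simp [pvRef] at h
  | cons line rest ih =>
    intro pos i c h
    simp only [pvRef] at h
    split at h
    · split at h
      · simp at h
      · simp at h; omega
    · simp only [Option.map_eq_some_iff] at h
      obtain ⟨⟨i', c'⟩, h1, h2⟩ := h
      have := ih _ _ _ h1
      have hl : (0:Int) ≤ PySem.Str.len line := by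
        simp [PySem.Str.len_eq]
      constructor
      · omega
      · cases h2; omega


theorem pvGo_correct : ∀ (doc : List String) (pos : Int) (i : Nat) (c : Int) (n a : Int),
    pvRef doc pos = some (i, c) → pos_to_vim_go doc (pos + a) n a = (n + i, c) := by
  intro doc
  induction doc with
  | nil => intro pos i c n a h; simp [pvRef] at h
  | cons line rest ih =>
    intro pos i c n a h
    simp only [pvRef] at h
    by_cases hlt : pos < PySem.Str.len line
    · rw [if_pos hlt] at h
      by_cases hneg : pos < 0
      · rw [if_pos hneg] at h; simp at h
      · rw [if_neg hneg] at h
        simp only [Option.some_inj, Prod.mk.injEq] at h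
        obtain ⟨hi, hc⟩ := h
        simp only [pos_to_vim_go]
        rw [if_pos (by omega), if_neg (by omega)]
        subst hc; rw [← hi]; simp
    · rw [if_neg hlt] at h
      simp only [Option.map_eq_some_iff] at h
      obtain ⟨⟨i', c'⟩, h1, h2⟩ := h
      simp only [Prod.mk.injEq] at h2
      obtain ⟨hii, hcc⟩ := h2
      subst hii; subst hcc
      simp only [pos_to_vim_go]
      rw [if_neg (by omega)]
      have := ih (pos - PySem.Str.len line - 1) i' c' (n + 1) (a + PySem.Str.len line + 1) h1
      rw [show pos + a = (pos - PySem.Str.len line - 1) + (a + PySem.Str.len line + 1) by ring]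
      rw [this]
      simp only [Prod.mk.injEq]
      refine ⟨by push_cast; ring, by trivial⟩

theorem pvStarts_shift : ∀ (doc : List String) (a : Int),
    pvStarts doc a = (pvStarts doc 0).map (fun x => a + x) := by
  intro doc
  induction doc with
  | nil => intro a; simp [pvStarts]
  | cons line rest ih =>
    intro a
    simp only [pvStarts, List.map_cons]
    refine List.cons_eq_cons.mpr ⟨by ring, ?_⟩
    rw [ih (a + PySem.Str.len line + 1), ih (0 + PySem.Str.len line + 1), List.map_map]
    congr 1; funext x; simp; ring

theorem pvAlt_correct : ∀ (doc : List String) (pos : Int) (i : Nat) (c : Int),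
    pvRef doc pos = some (i, c) →
    pvBisectRight (pvStarts doc 0) pos = (i : Int) + 1 ∧
    PySem.List.pyGet? (pvStarts doc 0) (i : Int) = some (pos - c) ∧
    ∃ line, PySem.List.pyGet? doc (i : Int) = some line ∧ c < PySem.Str.len line := by
  intro doc
  induction doc with
  | nil => intro pos i c h; simp [pvRef] at h
  | cons line rest ih =>
    intro pos i c h
    have hnn := pvRef_nonneg _ _ _ _ h
    simp only [pvRef] at h
    by_cases hlt : pos < PySem.Str.len line
    · rw [if_pos hlt, if_neg (by omega)] at h
      simp only [Option.some_inj, Prod.mk.injEq] at h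
      obtain ⟨hi, hc⟩ := h
      subst hc
      have hz : pvStarts (line :: rest) 0 = 0 :: pvStarts rest (0 + PySem.Str.len line + 1) := rfl
      have htw : (pvStarts rest (0 + PySem.Str.len line + 1)).takeWhile
          (fun s => decide (s ≤ pos)) = [] := by
        cases rest with
        | nil => simp [pvStarts]
        | cons l2 r2 =>
          simp only [pvStarts, List.takeWhile_cons]
          rw [decide_eq_false (by omega)]
          simp
      refine ⟨?_, ?_, ?_⟩
      · simp only [pvBisectRight, hz, List.takeWhile_cons, decide_eq_true_eq]
        rw [if_pos (by omega)]
        rw [htw]; simp [← hi]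
      · rw [hz, ← hi]; simp
      · rw [← hi]; exact ⟨line, by simp, hlt⟩
    · rw [if_neg hlt] at h
      simp only [Option.map_eq_some_iff] at h
      obtain ⟨⟨i', c'⟩, h1, h2⟩ := h
      simp only [Prod.mk.injEq] at h2
      obtain ⟨hii, hcc⟩ := h2
      subst hii; subst hcc
      have hnn' := pvRef_nonneg _ _ _ _ h1
      obtain ⟨ihB, ihG, lineR, ihD, ihC⟩ := ih _ _ _ h1
      have hz : pvStarts (line :: rest) 0 = 0 :: pvStarts rest (0 + PySem.Str.len line + 1) := rfl
      have hsh : pvStarts rest (0 + PySem.Str.len line + 1) =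
          (pvStarts rest 0).map (fun x => (0 + PySem.Str.len line + 1) + x) :=
        pvStarts_shift _ _
      have hlenpos : (0:Int) ≤ PySem.Str.len line := by simp [PySem.Str.len_eq]
      have hfun : ((fun s => decide (s ≤ pos)) ∘ fun x => (0 + PySem.Str.len line + 1) + x)
          = (fun x => decide (x ≤ pos - PySem.Str.len line - 1)) := by
        funext x
        simp only [Function.comp]
        exact decide_eq_decide.mpr (by omega)
      have htw : (pvStarts rest (0 + PySem.Str.len line + 1)).takeWhile
            (fun s => decide (s ≤ pos))
          = ((pvStarts rest 0).takeWhile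
              (fun s => decide (s ≤ pos - PySem.Str.len line - 1))).map
              (fun x => (0 + PySem.Str.len line + 1) + x) := by
        rw [hsh, List.takeWhile_map, hfun]
      have hlen : ((pvStarts rest 0).takeWhile
          (fun s => decide (s ≤ pos - PySem.Str.len line - 1))).length = i' + 1 := by
        simp only [pvBisectRight] at ihB
        omega
      refine ⟨?_, ?_, ?_⟩
      · simp only [pvBisectRight, hz, List.takeWhile_cons, decide_eq_true_eq]
        rw [if_pos (by omega), htw]
        simp only [List.length_cons, List.length_map]
        rw [hlen]; push_cast; ring
      · rw [hz]
        simp only [PySem.List.pyGet?_natCast, List.getElem?_cons_succ]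
        rw [hsh, List.getElem?_map]
        simp only [PySem.List.pyGet?_natCast] at ihG
        rw [ihG]
        simp only [Option.map_some]
        congr 1; omega
      · refine ⟨lineR, ?_, ihC⟩
        simp only [PySem.List.pyGet?_natCast, List.getElem?_cons_succ]
        simp only [PySem.List.pyGet?_natCast] at ihD
        exact ihD

theorem pvSum_nonneg : ∀ (l : List String),
    0 ≤ (l.map (fun s => PySem.Str.len s + 1)).sum := by
  intro l
  induction l with
  | nil => simp
  | cons x xs ih =>
    simp only [List.map_cons, List.sum_cons]
    have : (0:Int) ≤ PySem.Str.len x := by simp [PySem.Str.len_eq]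
    omega

theorem pvPre_to_ref : ∀ (doc : List String) (i : Nat) (pos : Int),
    i < doc.length →
    ((doc.take i).map (fun l => PySem.Str.len l + 1)).sum ≤ pos →
    pos < ((doc.take i).map (fun l => PySem.Str.len l + 1)).sum +
      PySem.Str.len (doc.getD i "") →
    0 ≤ pos →
    ∃ j c, pvRef doc pos = some (j, c) := by
  intro doc
  induction doc with
  | nil => intro i pos h; simp at h
  | cons line rest ih =>
    intro i pos hi h1 h2 h3
    cases i with
    | zero =>
      simp only [List.take_zero, List.map_nil, List.sum_nil] at h1 h2
      simp only [List.getD_cons_zero] at h2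
      refine ⟨0, pos, ?_⟩
      simp only [pvRef]
      rw [if_pos (show pos < PySem.Str.len line by omega), if_neg (by omega)]
    | succ j =>
      simp only [List.take_succ_cons, List.map_cons, List.sum_cons,
        List.getD_cons_succ] at h1 h2
      have hS : 0 ≤ ((rest.take j).map (fun l => PySem.Str.len l + 1)).sum :=
        pvSum_nonneg _
      have hlt : ¬ pos < PySem.Str.len line := by omega
      obtain ⟨j', c, hj⟩ := ih j (pos - PySem.Str.len line - 1)
        (by simpa using hi) (by omega) (by omega) (by omega)
      exact ⟨j' + 1, c, by simp only [pvRef, if_neg hlt, hj, Option.map_some]⟩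

theorem pos_to_vim_spec : Claim_equal_pos_to_vim := by
  intro document pos _ hpre
  obtain ⟨hpos, i, hi, h1, h2⟩ := hpre
  simp only [List.mem_range] at hi
  obtain ⟨j, c, href⟩ := pvPre_to_ref document i pos hi h1 h2 hpos
  have hnn := pvRef_nonneg _ _ _ _ href
  have hA : pos_to_vim document pos = (1 + (j : Int), c) := by
    have := pvGo_correct document pos j c 1 0 href
    rw [add_zero] at this
    simp only [pos_to_vim, if_neg (show ¬ pos < 0 by omega)]
    exact this
  obtain ⟨hB1, hB2, line, hB3, hB4⟩ := pvAlt_correct document pos j c href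
  show pos_to_vim document pos = pos_to_vim_alt document pos
  rw [hA]
  simp only [pos_to_vim_alt]
  rw [if_neg (show ¬ pos < 0 by omega)]
  simp only [pvBisectRight] at hB1 ⊢
  rw [hB1]
  rw [show (j:Int) + 1 - 1 = (j:Int) by ring]
  rw [if_neg (show ¬ (j:Int) < 0 by omega)]
  rw [hB2, hB3]
  simp only []
  rw [if_neg (show ¬ PySem.Str.len line ≤ pos - (pos - c) by omega)]
  simp only [Prod.mk.injEq]
  exact ⟨by ring, by ring⟩
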